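-- pv_equiv track=rewrite | github.com/benquick123/code-profiling | code/batch-1/dn6/M-64.py | custva
-- ===== SOURCE A (Python) =====
-- def unikati(s):
--     tab = []
--     for x in s:
--         if x not in tab:
--             tab.append(x)
--     return tab
--
-- def avtor(tvit):
--     tmp = tvit.split(' ')
--     return tmp[0][:-1]
--
-- def izloci_besedo(beseda):
--     i = 0
--     while i != len(beseda):
--         if i == 0 and not beseda[i].isalnum(): #znaki pred osrednjim delom
--             beseda = beseda[i+1:]
--             i = i - 1
--         elif i == len(beseda)-1 and not beseda[i].isalnum(): #znaki po osrednjem delu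
--             beseda = beseda[:i]
--             i = i - 2
--         i = i + 1
--     return beseda
--
-- def se_zacne_z(tvit, c):
--     tab = []
--     tmp = tvit.split(' ')
--     for x in tmp:
--         if x[0] == c:
--            tab.append(izloci_besedo(x[1:]))
--     return tab
--
-- def zberi_se_zacne_z(tviti, c):
--     tab = []
--     for tvit in tviti:
--         tmp = se_zacne_z(tvit, c)
--         for x in tmp:
--             tab.append(x)
--     return unikati(tab)
--
-- def vsi_hashtagi(tviti):
--     return zberi_se_zacne_z(tviti, '#')
--
-- def custva(tviti, hashtagi):
--     tab = []
--     for tvit in tviti: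
--         for hashtag in hashtagi:
--             if hashtag in vsi_hashtagi(tvit.split(" ")):
--                 tab.append(avtor(tvit))
--     tab = unikati(tab)
--     tab.sort()
--     return tab
-- ===== SOURCE B (Python) =====
-- def avtor(tvit):
--     tmp = tvit.split(' ')
--     return tmp[0][:-1]
--
-- def izloci_besedo(beseda):
--     i = 0
--     while i != len(beseda):
--         if i == 0 and not beseda[i].isalnum():
--             beseda = beseda[i+1:]
--             i = i - 1
--         elif i == len(beseda)-1 and not beseda[i].isalnum():
--             beseda = beseda[:i]
--             i = i - 2
--         i = i + 1
--     return beseda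
--
-- def se_zacne_z(tvit, c):
--     tab = []
--     tmp = tvit.split(' ')
--     for x in tmp:
--         if x[0] == c:
--            tab.append(izloci_besedo(x[1:]))
--     return tab
--
-- def custva(tviti, hashtagi):
--     if not hashtagi:
--         return []
--     wanted = set(hashtagi)
--     authors = []
--     for tvit in tviti:
--         tags = set()
--         for word in tvit.split(" "):
--             tags.update(se_zacne_z(word, '#'))
--         if tags & wanted:
--             authors.append(avtor(tvit))
--     return sorted(set(authors))
-- ===== Notes on version B (the rewrite author's own statement) =====
-- stated objective: faster
-- what changed: A re-parses every tweet into its full deduplicated hashtag list once per queried hashtag (calling vsi_hashtagi inside the inner loop); B parses each tweet exactly once into a set of its hashtags, intersects it with the set of queried hashtags, and returns sorted(set(authors)).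
import Mathlib
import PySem

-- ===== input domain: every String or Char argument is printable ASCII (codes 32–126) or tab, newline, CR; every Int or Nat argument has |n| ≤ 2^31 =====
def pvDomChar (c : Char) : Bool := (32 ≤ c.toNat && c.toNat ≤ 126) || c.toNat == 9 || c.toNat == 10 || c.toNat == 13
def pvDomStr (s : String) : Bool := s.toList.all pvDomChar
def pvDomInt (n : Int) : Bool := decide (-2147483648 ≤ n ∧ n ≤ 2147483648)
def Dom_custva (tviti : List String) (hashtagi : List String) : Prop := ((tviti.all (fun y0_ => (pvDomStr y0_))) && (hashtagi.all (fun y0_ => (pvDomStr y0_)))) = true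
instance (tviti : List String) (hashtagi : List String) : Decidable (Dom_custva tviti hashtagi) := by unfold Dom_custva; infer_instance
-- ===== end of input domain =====

-- B replaces A's per-(tweet,hashtag) re-parse of the tweet by a single parse per tweet into a
-- hashtag set intersected with the queried set (objective: faster, fewer parses), same result.


-- ===== PORT A =====
-- shared helpers (identical functions in Source A and Source B; both ports use them verbatim)

-- unikati: ordered first-occurrence dedup via 'x not in tab' + append
def unikati {α : Type} [DecidableEq α] (s : List α) : List α :=
  s.foldl (fun tab x => if x ∈ tab then tab else tab ++ [x]) []

-- avtor: tvit.split(' ')[0][:-1]; the pyGetD default is unreachable (split never returns [])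
def avtor (tvit : List Char) : String :=
  String.ofList (PySem.List.slice (PySem.List.pyGetD (PySem.Chars.splitOn tvit [' ']) 0 []) none (some (-1)))

-- izloci_besedo's while loop; i is a Nat: from entry i = 0 the Python int i provably stays ≥ 0
-- (the i-2 branch needs i = len-1 ≥ 1).  The ≤ in the stop test (Python: i == len) and the fuel
-- counter are totality guards only: fuel starts at 2*len+1 and the measure 2*len - i shrinks at
-- every iteration, so fuel never runs out on any entry from izlociBesedo.
def izlociLoop : Nat → List Char → Nat → List Char
  | 0, b, _ => b
  | fuel + 1, b, i =>
    if b.length ≤ i then b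
    else if i = 0 ∧ ¬(PySem.Chars.isalnum (PySem.List.pyGetD b (i : Int) ' ') = true) then
      izlociLoop fuel (PySem.List.slice b (some ((i + 1 : Nat) : Int)) none) 0
    else if i = b.length - 1 ∧ ¬(PySem.Chars.isalnum (PySem.List.pyGetD b (i : Int) ' ') = true) then
      izlociLoop fuel (PySem.List.slice b none (some ((i : Nat) : Int))) (i - 1)
    else izlociLoop fuel b (i + 1)

def izlociBesedo (beseda : List Char) : List Char := izlociLoop (2 * beseda.length + 1) beseda 0

-- se_zacne_z; x[0] raises IndexError on an empty word — Pre_ excludes that, the pyGetD default is then unreachable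
def seZacneZ (tvit : List Char) (c : Char) : List (List Char) :=
  (PySem.Chars.splitOn tvit [' ']).foldl
    (fun tab x => if PySem.List.pyGetD x 0 ' ' = c
      then tab ++ [izlociBesedo (PySem.List.slice x (some 1) none)] else tab) []

def zberiSeZacneZ (tviti : List (List Char)) (c : Char) : List (List Char) :=
  unikati (tviti.foldl (fun tab tvit => tab ++ seZacneZ tvit c) [])

def vsiHashtagi (tviti : List (List Char)) : List (List Char) := zberiSeZacneZ tviti '#'

def custva (tviti : List String) (hashtagi : List String) : List String :=
  let tab := tviti.foldl (fun tab tvit =>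
    hashtagi.foldl (fun tab hashtag =>
      if hashtag.toList ∈ vsiHashtagi (PySem.Chars.splitOn tvit.toList [' '])
      then tab ++ [avtor tvit.toList] else tab) tab) []
  PySem.List.sorted (unikati tab) (fun s => s) false

-- ===== PORT B =====
def custva_alt (tviti : List String) (hashtagi : List String) : List String :=
  if hashtagi = [] then []
  else
    let wanted : PySem.Set (List Char) := PySem.Set.ofList (hashtagi.map String.toList)
    let authors := tviti.foldl (fun acc tvit =>
      let tags : PySem.Set (List Char) :=
        (PySem.Chars.splitOn tvit.toList [' ']).foldl
          (fun s word => PySem.Set.update s (seZacneZ word '#')) PySem.Set.empty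
      if PySem.Set.inter tags wanted ≠ [] then acc ++ [avtor tvit.toList] else acc) []
    PySem.List.sorted (PySem.Set.ofList authors) (fun s => s) false

-- ===== PRECONDITION & SPEC =====
-- Pre_ excludes exactly the inputs where the Python A raises IndexError: a query list that is
-- non-empty together with some tweet whose split(' ') contains an empty word ('' , leading/trailing
-- or doubled spaces) — se_zacne_z then evaluates x[0] on x = ''.  (B raises there too.)
def Pre_custva (tviti : List String) (hashtagi : List String) : Prop :=
  hashtagi = [] ∨ ∀ t ∈ tviti, [] ∉ PySem.Chars.splitOn t.toList [' ']
instance (tviti : List String) (hashtagi : List String) : Decidable (Pre_custva tviti hashtagi) := by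
  unfold Pre_custva; infer_instance

def pvWitness_custva : List String × List String :=
  (["ana: dober #dan #sreca", "bine: nov #dan prihaja"], ["dan", "mir"])

def Spec_custva (tviti : List String) (hashtagi : List String) (out : List String) : Prop := out = custva_alt tviti hashtagi
instance (tviti : List String) (hashtagi : List String) (out : List String) : Decidable (Spec_custva tviti hashtagi out) := by unfold Spec_custva; infer_instance

-- ===== CLAIM (what is proved, stated in full; the proofs are below) =====
def Claim_equal_custva : Prop := ∀ (tviti : List String) (hashtagi : List String), Dom_custva tviti hashtagi → Pre_custva tviti hashtagi → Spec_custva tviti hashtagi (custva tviti hashtagi)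

-- ===== LEMMAS AND PROOFS =====

theorem mem_foldl_dedup {α : Type} [DecidableEq α] (s acc : List α) (x : α) :
    x ∈ s.foldl (fun tab x => if x ∈ tab then tab else tab ++ [x]) acc ↔ x ∈ acc ∨ x ∈ s := by
  induction s generalizing acc with
  | nil => simp
  | cons a t ih =>
    by_cases h : a ∈ acc
    · simp [h, ih]
      constructor
      · tauto
      · rintro (hx | rfl | hx) <;> tauto
    · simp [h, ih]
      tauto

theorem nodup_foldl_dedup {α : Type} [DecidableEq α] (s acc : List α) (h : acc.Nodup) :
    (s.foldl (fun tab x => if x ∈ tab then tab else tab ++ [x]) acc).Nodup := by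
  induction s generalizing acc with
  | nil => simpa
  | cons a t ih =>
    by_cases ha : a ∈ acc
    · simpa [ha] using ih acc h
    · simp only [List.foldl_cons, if_neg ha]
      exact ih _ (by simp [← List.concat_eq_append, List.nodup_concat, ha, h])

theorem mem_unikati {α : Type} [DecidableEq α] (s : List α) (x : α) :
    x ∈ unikati s ↔ x ∈ s := by
  simp [unikati, mem_foldl_dedup]

theorem nodup_unikati {α : Type} [DecidableEq α] (s : List α) : (unikati s).Nodup :=
  nodup_foldl_dedup s [] List.nodup_nil

theorem mem_foldl_append_ite {α β : Type} (p : α → Prop) [DecidablePred p] (f : α → β)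
    (l : List α) (acc : List β) (x : β) :
    x ∈ l.foldl (fun acc a => if p a then acc ++ [f a] else acc) acc ↔
      x ∈ acc ∨ ∃ a ∈ l, p a ∧ x = f a := by
  induction l generalizing acc with
  | nil => simp
  | cons a t ih =>
    by_cases h : p a
    · simp [h, ih]
      tauto
    · simp [h, ih]

theorem mem_vsiHashtagi (ws : List (List Char)) (y : List Char) :
    y ∈ vsiHashtagi ws ↔ y ∈ ws.flatMap (fun w => seZacneZ w '#') := by
  rw [vsiHashtagi, zberiSeZacneZ, mem_unikati,
    PySem.List.foldl_append_eq_flatMap (fun w => seZacneZ w '#') ws []]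
  simp

theorem mem_tags (ws : List (List Char)) (y : List Char) :
    y ∈ ws.foldl (fun s word => PySem.Set.update s (seZacneZ word '#')) PySem.Set.empty ↔
      y ∈ ws.flatMap (fun w => seZacneZ w '#') := by
  have key : ∀ (s0 : PySem.Set (List Char)),
      y ∈ ws.foldl (fun s word => PySem.Set.update s (seZacneZ word '#')) s0 ↔
        y ∈ s0 ∨ y ∈ ws.flatMap (fun w => seZacneZ w '#') := by
    induction ws with
    | nil => simp
    | cons w t ih =>
      intro s0
      simp [List.foldl_cons, ih, PySem.Set.mem_update]
      tauto
  simpa [PySem.Set.empty] using key PySem.Set.empty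

theorem cond_eq (tvit : String) (hashtagi : List String) :
    (PySem.Set.inter
        ((PySem.Chars.splitOn tvit.toList [' ']).foldl
          (fun s word => PySem.Set.update s (seZacneZ word '#')) PySem.Set.empty)
        (PySem.Set.ofList (hashtagi.map String.toList)) ≠ []) ↔
      ∃ h ∈ hashtagi, h.toList ∈ vsiHashtagi (PySem.Chars.splitOn tvit.toList [' ']) := by
  rw [PySem.Set.inter, Ne, List.filter_eq_nil_iff]
  push Not
  constructor
  · rintro ⟨y, hy, hc⟩
    have : y ∈ PySem.Set.ofList (hashtagi.map String.toList) := by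
      simpa [List.contains_eq_mem] using hc
    rw [PySem.Set.mem_ofList, List.mem_map] at this
    obtain ⟨h, hh, rfl⟩ := this
    exact ⟨h, hh, (mem_vsiHashtagi _ _).2 ((mem_tags _ _).1 hy)⟩
  · rintro ⟨h, hh, hmem⟩
    refine ⟨h.toList, (mem_tags _ _).2 ((mem_vsiHashtagi _ _).1 hmem), ?_⟩
    simp [List.contains_eq_mem, PySem.Set.mem_ofList]
    exact ⟨h, hh, rfl⟩

theorem memA (tviti : List String) (hashtagi : List String) (acc : List String) (x : String) :
    x ∈ tviti.foldl (fun tab tvit =>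
        hashtagi.foldl (fun tab hashtag =>
          if hashtag.toList ∈ vsiHashtagi (PySem.Chars.splitOn tvit.toList [' '])
          then tab ++ [avtor tvit.toList] else tab) tab) acc ↔
      x ∈ acc ∨ ∃ t ∈ tviti,
        (∃ h ∈ hashtagi, h.toList ∈ vsiHashtagi (PySem.Chars.splitOn t.toList [' '])) ∧
          x = avtor t.toList := by
  induction tviti generalizing acc with
  | nil => simp
  | cons t ts ih =>
    rw [List.foldl_cons, ih,
      mem_foldl_append_ite (fun h : String => h.toList ∈ vsiHashtagi (PySem.Chars.splitOn t.toList [' ']))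
        (fun _ => avtor t.toList) hashtagi acc x]
    simp only [List.mem_cons]
    constructor
    · rintro ((hx | ⟨h, hh, hp, rfl⟩) | ⟨u, hu, hc, rfl⟩)
      · exact Or.inl hx
      · exact Or.inr ⟨t, Or.inl rfl, ⟨h, hh, hp⟩, rfl⟩
      · exact Or.inr ⟨u, Or.inr hu, hc, rfl⟩
    · rintro (hx | ⟨u, (rfl | hu), hc, rfl⟩)
      · exact Or.inl (Or.inl hx)
      · exact Or.inl (Or.inr (by obtain ⟨h, hh, hp⟩ := hc; exact ⟨h, hh, hp, rfl⟩))
      · exact Or.inr ⟨u, hu, hc, rfl⟩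

theorem custva_spec' (tviti : List String) (hashtagi : List String) :
    custva tviti hashtagi = custva_alt tviti hashtagi := by
  unfold custva custva_alt
  by_cases hh : hashtagi = []
  · subst hh
    have : tviti.foldl (fun (tab : List String) _ => tab) ([] : List String) = [] := by
      induction tviti with
      | nil => rfl
      | cons t ts ih => simp only [List.foldl_cons]; exact ih
    simp only [List.foldl_nil, this]
    rfl
  · simp only [if_neg hh]
    apply PySem.List.sorted_eq_sorted_of_perm _ _ _ (fun a b h => h)
    rw [List.perm_ext_iff_of_nodup (nodup_unikati _) (PySem.Set.nodup_ofList _)]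
    intro a
    rw [mem_unikati, PySem.Set.mem_ofList, memA,
      mem_foldl_append_ite
        (fun tvit : String => PySem.Set.inter
          ((PySem.Chars.splitOn tvit.toList [' ']).foldl
            (fun s word => PySem.Set.update s (seZacneZ word '#')) PySem.Set.empty)
          (PySem.Set.ofList (hashtagi.map String.toList)) ≠ [])
        (fun tvit => avtor tvit.toList) tviti [] a]
    simp only [List.not_mem_nil, false_or]
    constructor
    · rintro ⟨t, ht, hc, rfl⟩
      exact ⟨t, ht, (cond_eq t hashtagi).2 hc, rfl⟩
    · rintro ⟨t, ht, hc, rfl⟩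
      exact ⟨t, ht, (cond_eq t hashtagi).1 hc, rfl⟩

-- ===== VERDICT (by name: the statement is the Claim_ definition above) =====
theorem custva_spec : Claim_equal_custva := by
  intro tviti hashtagi _ _
  unfold Spec_custva
  exact custva_spec' tviti hashtagi
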